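-- pv_equiv track=rewrite | github.com/BitanDor/NIT-ZKP | BitTorrent Demos/client_request.py | to_felts
-- ===== SOURCE A (Python) =====
-- char_types = {
--     "spacebar": [32],
--     "digits": [48 + i for i in range(10)],
--     "letters": [65 + i for i in range(26)] + [97 + i for i in range(26)],
--     "sign-words": [33 + i for i in range(15)] +
--     [58 + i for i in range(7)] +
--     [91 + i for i in range(6)] +
--     [123 + i for i in range(4)]
-- }
--
-- types_index = {
--     "spacebar": "0",
--     "digits": "1",
--     "letters": "2",
--     "sign-words": "4"
-- }
--
-- def to_felts(line):
--     words = []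
--     types = types_of_line(line)
--     types_with_breaks = chr(167)
--     line_with_breaks = chr(167)
--     for char_type, char in zip(types, line):
--         if char_type == "0" and types_with_breaks[-1] == "0":
--             pass
--         else:
--             if char_type == types_with_breaks[-1] and char_type != "4":
--                 types_with_breaks += char_type
--                 line_with_breaks += char
--             else:
--                 types_with_breaks += chr(167)
--                 types_with_breaks += char_type
--                 line_with_breaks += chr(167)
--                 line_with_breaks += char
--     new_words = line_with_breaks.split(chr(167))
--     for new_word in new_words:
--         if new_word:
--             words.append(new_word)
--     words.append("END_OF_LINE")
--     felts = []
--     for word in words: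
--         felts.append(convert_word_to_cairo_felt(word))
--     return felts
--
-- def key_for_val(val):
--     '''val is an integer indicating the ord(.) of a char'''
--     '''the function returns the type of the char as a char between 0-4'''
--     for key in char_types:
--         if val in char_types[key]:
--             return types_index[key]
--     return "4"
--
-- def types_of_line(line):
--     '''line is a line of words'''
--     '''the function returns a line that indicates the types of each entry'''
--     types = ""
--     for char in line:
--         types += key_for_val(ord(char))
--     return types
--
-- def convert_word_to_cairo_felt(word):
--     l = len(word)
--     if l == 0:
--         return 0
--     count = 0
--     for i, letter in enumerate(word):
--         count += ord(letter)*pow(256, l-1-i)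
--     return count
-- ===== SOURCE B (Python) =====
-- def to_felts(line):
--     def ctype(c):
--         o = ord(c)
--         if o == 32:
--             return 0
--         if 48 <= o <= 57:
--             return 1
--         if 65 <= o <= 90 or 97 <= o <= 122:
--             return 2
--         return 4
--
--     def encode(word):
--         n = 0
--         for ch in word:
--             n = n * 256 + ord(ch)
--         return n
--
--     words = []
--     cur = ""
--     prev = -1  # type of the last kept character; -1 = none yet
--     for ch in line:
--         t = ctype(ch)
--         if t == 0 and prev == 0:
--             continue  # collapse runs of spaces
--         if t == prev and t != 4:
--             cur += ch
--         else:
--             if cur: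
--                 words.append(cur)
--             cur = ch
--         prev = t
--     if cur:
--         words.append(cur)
--     words.append("END_OF_LINE")
--     return [encode(w) for w in words]
-- ===== Notes on version B (the rewrite author's own statement) =====
-- stated objective: simpler
-- what changed: Replaces A's three-pass marker-string machinery (classify every char into a parallel types string via dict scans, build a chr(167)-delimited copy of the line, split it on the marker and filter empties) by a single pass over the characters that maintains the current word and the previous kept type directly, and encodes each word with a Horner base-256 loop instead of enumerate with explicit powers.
import Mathlib
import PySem

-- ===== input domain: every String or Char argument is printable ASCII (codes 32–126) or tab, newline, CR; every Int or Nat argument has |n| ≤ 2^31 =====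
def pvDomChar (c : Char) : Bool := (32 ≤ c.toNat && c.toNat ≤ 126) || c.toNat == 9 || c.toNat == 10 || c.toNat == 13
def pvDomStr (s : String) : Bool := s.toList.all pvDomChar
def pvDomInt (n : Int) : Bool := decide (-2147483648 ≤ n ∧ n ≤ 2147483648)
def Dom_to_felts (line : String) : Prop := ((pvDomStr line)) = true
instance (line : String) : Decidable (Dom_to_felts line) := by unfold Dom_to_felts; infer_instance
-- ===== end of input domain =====

-- B replaces A's marker-string build/split/filter passes by one direct pass keeping the
-- current word and previous kept type, with Horner base-256 word encoding (objective: simpler).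

-- ===== PORT A =====
-- chr(167), the break marker A inserts between words
def pvSep : Char := Char.ofNat 167

def charTypes : List (String × List Int) :=
  [("spacebar", [32]),
   ("digits", (List.range 10).map (fun i : Nat => (48 : Int) + i)),
   ("letters", (List.range 26).map (fun i : Nat => (65 : Int) + i) ++ (List.range 26).map (fun i : Nat => (97 : Int) + i)),
   ("sign-words", (List.range 15).map (fun i : Nat => (33 : Int) + i) ++ (List.range 7).map (fun i : Nat => (58 : Int) + i)
      ++ (List.range 6).map (fun i : Nat => (91 : Int) + i) ++ (List.range 4).map (fun i : Nat => (123 : Int) + i))]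

-- types_index; the 1-character Python strings "0".."4" are represented as Chars
def typesIndex : List (String × Char) :=
  [("spacebar", '0'), ("digits", '1'), ("letters", '2'), ("sign-words", '4')]

-- the 'for key in char_types' loop of key_for_val; types_index[key] always hits, default unreachable
def key_for_val_go : Int → List (String × List Int) → Char
  | _, [] => '4'
  | val, kv :: rest => if val ∈ kv.2 then ((typesIndex.lookup kv.1).getD '4') else key_for_val_go val rest

def key_for_val (val : Int) : Char := key_for_val_go val charTypes

def types_of_line (line : String) : List Char :=
  line.toList.foldl (fun types c => types ++ [key_for_val (c.toNat : Int)]) []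

def convert_word_to_cairo_felt (word : List Char) : Int :=
  let l := word.length
  if l = 0 then 0 else
  (PySem.List.enumerate word 0).foldl
    (fun count p => count + (p.2.toNat : Int) * 256 ^ (((l : Int) - 1 - p.1).toNat)) 0

-- body of A's zip loop; st = (types_with_breaks, line_with_breaks); both stay nonempty so the
-- pyGetD default of Python's s[-1] is unreachable
def stepA (st : List Char × List Char) (p : Char × Char) : List Char × List Char :=
  if p.1 = '0' ∧ PySem.List.pyGetD st.1 (-1) ' ' = '0' then st
  else if p.1 = PySem.List.pyGetD st.1 (-1) ' ' ∧ p.1 ≠ '4' then (st.1 ++ [p.1], st.2 ++ [p.2])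
  else (st.1 ++ [pvSep, p.1], st.2 ++ [pvSep, p.2])

def to_felts (line : String) : List Int :=
  let types := types_of_line line
  let st := (types.zip line.toList).foldl stepA ([pvSep], [pvSep])
  let new_words := PySem.Chars.splitOn st.2 [pvSep]
  let words := new_words.foldl (fun ws w => if w ≠ [] then ws ++ [w] else ws) []
  (words ++ ["END_OF_LINE".toList]).foldl (fun felts w => felts ++ [convert_word_to_cairo_felt w]) []

-- ===== PORT B =====
def pvCtype (c : Char) : Int :=
  if (c.toNat : Int) = 32 then 0
  else if 48 ≤ (c.toNat : Int) ∧ (c.toNat : Int) ≤ 57 then 1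
  else if (65 ≤ (c.toNat : Int) ∧ (c.toNat : Int) ≤ 90) ∨ (97 ≤ (c.toNat : Int) ∧ (c.toNat : Int) ≤ 122) then 2
  else 4

def pvEncode (word : List Char) : Int := word.foldl (fun n c => n * 256 + (c.toNat : Int)) 0

-- body of B's loop; st = (words, cur, prev)
def stepB (st : List (List Char) × List Char × Int) (c : Char) : List (List Char) × List Char × Int :=
  let t := pvCtype c
  if t = 0 ∧ st.2.2 = 0 then st
  else if t = st.2.2 ∧ t ≠ 4 then (st.1, st.2.1 ++ [c], t)
  else ((if st.2.1 ≠ [] then st.1 ++ [st.2.1] else st.1), [c], t)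

def to_felts_alt (line : String) : List Int :=
  let st := line.toList.foldl stepB ([], [], -1)
  let words := if st.2.1 ≠ [] then st.1 ++ [st.2.1] else st.1
  (words ++ ["END_OF_LINE".toList]).map pvEncode

-- ===== PRECONDITION & SPEC =====
def Spec_to_felts (line : String) (out : List Int) : Prop := out = to_felts_alt line
instance (line : String) (out : List Int) : Decidable (Spec_to_felts line out) := by unfold Spec_to_felts; infer_instance

-- ===== CLAIM (what is proved, stated in full; the proofs are below) =====
def Claim_equal_to_felts : Prop := ∀ (line : String), Dom_to_felts line → Spec_to_felts line (to_felts line)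

-- ===== LEMMAS AND PROOFS =====

-- the char A's marker string carries for B's integer type code (-1 = initial marker chr(167))
def reprc (t : Int) : Char :=
  if t = 0 then '0' else if t = 1 then '1' else if t = 2 then '2' else if t = 4 then '4' else '§'

-- render B's segments the way A's line_with_breaks stores them (a marker before each)
def joinS (segs : List (List Char)) : List Char := (segs.map (fun w => pvSep :: w)).flatten

def segsOf (words : List (List Char)) (cur : List Char) : List (List Char) :=
  if cur ≠ [] then words ++ [cur] else words

-- structural description of Python's str.split on a single-char separator
def hsplit (s : Char) : List Char → List Char → List (List Char)
  | pre, [] => [pre]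
  | pre, c :: rest => if c = s then pre :: hsplit s [] rest else hsplit s (pre ++ [c]) rest

-- big-endian base-256 value, the common meaning of both word encoders
def msb : List Char → Int
  | [] => 0
  | c :: w => (c.toNat : Int) * 256 ^ w.length + msb w

-- the coupling invariant between A's state (tw, lwb) and B's state (words, cur, prev)
def R (a : List Char × List Char) (b : List (List Char) × List Char × Int) : Prop :=
  PySem.List.pyGetD a.1 (-1) ' ' = reprc b.2.2 ∧
  a.2 = pvSep :: joinS (segsOf b.1 b.2.1) ∧
  (∀ w ∈ b.1, w ≠ []) ∧ (∀ w ∈ b.1, pvSep ∉ w) ∧ pvSep ∉ b.2.1 ∧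
  (b.2.2 = -1 ∨ b.2.2 = 0 ∨ b.2.2 = 1 ∨ b.2.2 = 2 ∨ b.2.2 = 4) ∧
  (b.2.2 = -1 → b.2.1 = []) ∧ (b.2.2 ≠ -1 → b.2.1 ≠ [])

theorem key_eq (c : Char) : key_for_val (c.toNat : Int) = reprc (pvCtype c) := by
  have hrange : ∀ (a : Int) (k : Nat) (n : Int),
      (n ∈ (List.range k).map (fun i : Nat => a + (i : Int))) ↔ (a ≤ n ∧ n < a + k) := by
    intro a k n
    simp only [List.mem_map]
    constructor
    · rintro ⟨i, hi, e⟩; rw [List.mem_range] at hi; omega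
    · intro h
      refine ⟨(n - a).toNat, ?_, by omega⟩
      rw [List.mem_range]; omega
  simp only [key_for_val, charTypes, key_for_val_go, typesIndex, List.lookup,
    List.mem_append, hrange, List.mem_cons, List.not_mem_nil]
  simp only [pvCtype, reprc]
  norm_num
  split_ifs <;> try rfl
  all_goals try omega


theorem joinS_snoc (segs : List (List Char)) (w : List Char) :
    joinS (segs ++ [w]) = joinS segs ++ pvSep :: w := by
  simp [joinS]

theorem Rappend (tw lwb : List Char) (words : List (List Char)) (cur : List Char) (c : Char)
    (t : Int) (hcsep : c ≠ pvSep)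
    (h2 : lwb = pvSep :: joinS (segsOf words cur))
    (h3 : ∀ w ∈ words, w ≠ []) (h4 : ∀ w ∈ words, pvSep ∉ w) (h5 : pvSep ∉ cur)
    (hcur : cur ≠ []) (ht : t = 0 ∨ t = 1 ∨ t = 2 ∨ t = 4) :
    R (tw ++ [reprc t], lwb ++ [c]) (words, cur ++ [c], t) := by
  refine ⟨PySem.List.pyGetD_neg_one_append_singleton tw (reprc t) ' ', ?_, h3, h4, ?_, ?_, ?_, ?_⟩
  · rw [h2]
    simp only [segsOf, if_pos hcur, if_pos (by simp : cur ++ [c] ≠ [])]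
    rw [joinS_snoc, joinS_snoc]
    simp
  · simp only [List.mem_append, List.mem_singleton]
    rintro (h | h)
    · exact h5 h
    · exact hcsep h.symm
  · tauto
  · intro e; subst e; rcases ht with h | h | h | h <;> norm_num at h
  · intro _; simp

theorem Rnew (tw lwb : List Char) (words : List (List Char)) (cur : List Char) (c : Char)
    (t : Int) (hcsep : c ≠ pvSep)
    (h2 : lwb = pvSep :: joinS (segsOf words cur))
    (h3 : ∀ w ∈ words, w ≠ []) (h4 : ∀ w ∈ words, pvSep ∉ w) (h5 : pvSep ∉ cur)
    (ht : t = 0 ∨ t = 1 ∨ t = 2 ∨ t = 4) :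
    R (tw ++ [pvSep, reprc t], lwb ++ [pvSep, c])
      ((if cur = [] then words else words ++ [cur]), [c], t) := by
  refine ⟨?_, ?_, ?_, ?_, ?_, ?_, ?_, ?_⟩
  · rw [show tw ++ [pvSep, reprc t] = (tw ++ [pvSep]) ++ [reprc t] by simp]
    exact PySem.List.pyGetD_neg_one_append_singleton _ (reprc t) ' '
  · rw [h2]
    have hflush : (if cur = [] then words else words ++ [cur]) = segsOf words cur := by
      by_cases h : cur = [] <;> simp [segsOf, h]
    rw [hflush]
    simp only [segsOf, if_pos (by simp : ([c] : List Char) ≠ [])]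
    rw [joinS_snoc]
    simp
  · intro w hw
    dsimp only at hw
    by_cases hcur : cur = []
    · rw [if_pos hcur] at hw; exact h3 w hw
    · rw [if_neg hcur] at hw
      rcases List.mem_append.1 hw with hm | hm
      · exact h3 w hm
      · simp at hm; subst hm; exact hcur
  · intro w hw
    dsimp only at hw
    by_cases hcur : cur = []
    · rw [if_pos hcur] at hw; exact h4 w hw
    · rw [if_neg hcur] at hw
      rcases List.mem_append.1 hw with hm | hm
      · exact h4 w hm
      · simp at hm; subst hm; exact h5
  · simp only [List.mem_singleton]
    intro e; exact hcsep e.symm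
  · tauto
  · intro e; subst e; rcases ht with h | h | h | h <;> norm_num at h
  · intro _; simp


set_option maxHeartbeats 1000000 in
theorem stepR (c : Char) (hc : pvDomChar c = true) (a b) (h : R a b) :
    R (stepA a (key_for_val (c.toNat : Int), c)) (stepB b c) := by
  obtain ⟨tw, lwb⟩ := a
  obtain ⟨words, cur, prev⟩ := b
  have hcsep : c ≠ pvSep := by
    intro e; subst e; revert hc; decide
  have ht : pvCtype c = 0 ∨ pvCtype c = 1 ∨ pvCtype c = 2 ∨ pvCtype c = 4 := by
    unfold pvCtype; split_ifs <;> simp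
  obtain ⟨h1, h2, h3, h4, h5, h6, h7, h8⟩ := h
  dsimp only at h1 h2 h3 h4 h5 h7 h8
  rcases h6 with hp | hp | hp | hp | hp <;> subst hp <;>
    rcases ht with ht | ht | ht | ht <;>
    simp only [stepA, stepB, key_eq c, ht, h1] <;>
    simp [reprc]
  · exact Rnew tw lwb words cur c 0 hcsep h2 h3 h4 h5 (by norm_num)
  · exact Rnew tw lwb words cur c 1 hcsep h2 h3 h4 h5 (by norm_num)
  · exact Rnew tw lwb words cur c 2 hcsep h2 h3 h4 h5 (by norm_num)
  · exact Rnew tw lwb words cur c 4 hcsep h2 h3 h4 h5 (by norm_num)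
  · exact ⟨h1, h2, h3, h4, h5, by norm_num, h7, h8⟩
  · exact Rnew tw lwb words cur c 1 hcsep h2 h3 h4 h5 (by norm_num)
  · exact Rnew tw lwb words cur c 2 hcsep h2 h3 h4 h5 (by norm_num)
  · exact Rnew tw lwb words cur c 4 hcsep h2 h3 h4 h5 (by norm_num)
  · exact Rnew tw lwb words cur c 0 hcsep h2 h3 h4 h5 (by norm_num)
  · exact Rappend tw lwb words cur c 1 hcsep h2 h3 h4 h5 (h8 (by norm_num)) (by norm_num)
  · exact Rnew tw lwb words cur c 2 hcsep h2 h3 h4 h5 (by norm_num)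
  · exact Rnew tw lwb words cur c 4 hcsep h2 h3 h4 h5 (by norm_num)
  · exact Rnew tw lwb words cur c 0 hcsep h2 h3 h4 h5 (by norm_num)
  · exact Rnew tw lwb words cur c 1 hcsep h2 h3 h4 h5 (by norm_num)
  · exact Rappend tw lwb words cur c 2 hcsep h2 h3 h4 h5 (h8 (by norm_num)) (by norm_num)
  · exact Rnew tw lwb words cur c 4 hcsep h2 h3 h4 h5 (by norm_num)
  · exact Rnew tw lwb words cur c 0 hcsep h2 h3 h4 h5 (by norm_num)
  · exact Rnew tw lwb words cur c 1 hcsep h2 h3 h4 h5 (by norm_num)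
  · exact Rnew tw lwb words cur c 2 hcsep h2 h3 h4 h5 (by norm_num)
  · exact Rnew tw lwb words cur c 4 hcsep h2 h3 h4 h5 (by norm_num)

theorem loopR (cs : List Char) : ∀ a b, (∀ c ∈ cs, pvDomChar c = true) → R a b →
    R (cs.foldl (fun st c => stepA st (key_for_val (c.toNat : Int), c)) a) (cs.foldl stepB b) := by
  intro a b hdom h
  induction cs generalizing a b with
  | nil => exact h
  | cons c cs ih =>
      exact ih _ _ (fun x hx => hdom x (List.mem_cons_of_mem _ hx))
        (stepR c (hdom c (by simp)) a b h)

theorem go_eq (s : Char) : ∀ (fuel : Nat) (l cur : List Char) (acc : List (List Char)),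
    l.length ≤ fuel →
    PySem.Chars.splitOn.go [s] fuel l cur acc = acc.reverse ++ hsplit s cur.reverse l := by
  intro fuel
  induction fuel with
  | zero =>
      intro l cur acc h
      have : l = [] := by cases l <;> simp_all
      subst this
      simp [PySem.Chars.splitOn.go, hsplit]
  | succ fuel ih =>
      intro l cur acc h
      cases l with
      | nil => simp [PySem.Chars.splitOn.go, hsplit]
      | cons c rest =>
          simp only [PySem.Chars.splitOn.go]
          by_cases hcs : s = c
          · subst hcs
            rw [if_pos (by simp [List.isPrefixOf])]
            rw [ih _ _ _ (by simp at h ⊢; omega)]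
            simp [hsplit]
          · rw [if_neg (by simp [List.isPrefixOf]; exact hcs)]
            rw [ih _ _ _ (by simp at h ⊢; omega)]
            simp only [hsplit]
            rw [if_neg (fun e : c = s => hcs e.symm)]
            simp

theorem splitOn_eq (s : Char) (l : List Char) :
    PySem.Chars.splitOn l [s] = hsplit s [] l := by
  rw [PySem.Chars.splitOn, go_eq s (l.length + 1) l [] [] (by omega)]
  simp

theorem hsplit_consume (s : Char) : ∀ (w : List Char) (pre t : List Char), s ∉ w →
    hsplit s pre (w ++ t) = hsplit s (pre ++ w) t := by
  intro w
  induction w with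
  | nil => intro pre t _; simp
  | cons c w ih =>
      intro pre t hs
      have hcs : c ≠ s := by simp at hs; exact fun e => hs.1 e.symm
      simp only [List.cons_append, hsplit, if_neg hcs]
      rw [ih _ _ (by simp at hs; exact hs.2)]
      simp

theorem hsplit_joinS : ∀ (segs : List (List Char)) (pre : List Char),
    (∀ w ∈ segs, pvSep ∉ w) → hsplit pvSep pre (joinS segs) = pre :: segs := by
  intro segs
  induction segs with
  | nil => intro pre _; simp [joinS, hsplit]
  | cons w rest ih =>
      intro pre hs
      have : joinS (w :: rest) = pvSep :: (w ++ joinS rest) := by simp [joinS]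
      rw [this]
      simp only [hsplit]
      rw [hsplit_consume pvSep w [] (joinS rest) (hs w (by simp))]
      simp only [List.nil_append]
      rw [ih w (fun x hx => hs x (by simp [hx]))]
      simp

theorem foldl_horner : ∀ (w : List Char) (a : Int),
    w.foldl (fun n c => n * 256 + (c.toNat : Int)) a = a * 256 ^ w.length + msb w := by
  intro w
  induction w with
  | nil => intro a; simp [msb]
  | cons c w ih =>
      intro a
      simp only [List.foldl_cons, msb, List.length_cons, ih]
      ring

theorem foldl_bigend : ∀ (w : List Char) (k L : Nat) (a : Int), k + w.length = L →
    (PySem.List.enumerate w (k : Int)).foldl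
      (fun cnt p => cnt + (p.2.toNat : Int) * 256 ^ (((L : Int) - 1 - p.1).toNat)) a
    = a + msb w := by
  intro w
  induction w with
  | nil => intro k L a _; simp [PySem.List.enumerate, msb]
  | cons c w ih =>
      intro k L a hkL
      simp only [List.length_cons] at hkL
      rw [PySem.List.enumerate_cons]
      simp only [List.foldl_cons, msb]
      have hcast : ((k : Int) + 1) = ((k + 1 : Nat) : Int) := by push_cast; ring
      rw [hcast, ih (k + 1) L _ (by omega)]
      have hexp : (((L : Int) - 1 - (k : Int)).toNat) = w.length := by omega
      rw [hexp]
      ring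

theorem convert_eq_encode : convert_word_to_cairo_felt = pvEncode := by
  funext w
  cases w with
  | nil => simp [convert_word_to_cairo_felt, pvEncode]
  | cons c w =>
      have h1 := foldl_bigend (c :: w) 0 (c :: w).length 0 (by simp)
      have h2 := foldl_horner (c :: w) 0
      simp only [convert_word_to_cairo_felt, pvEncode]
      rw [if_neg (by simp)]
      simp only [Nat.cast_zero] at h1
      rw [h1, h2]
      simp

-- ===== VERDICT (by name: the statement is the Claim_ definition above) =====
theorem foldl_keep : ∀ (segs : List (List Char)) (init : List (List Char)),
    (∀ w ∈ segs, w ≠ []) →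
    segs.foldl (fun ws w => if w ≠ [] then ws ++ [w] else ws) init = init ++ segs := by
  intro segs
  induction segs with
  | nil => intro init _; simp
  | cons w rest ih =>
      intro init h
      simp only [List.foldl_cons, if_pos (h w (by simp))]
      rw [ih _ (fun x hx => h x (by simp [hx]))]
      simp

theorem segs_sepfree (words : List (List Char)) (cur : List Char)
    (h4 : ∀ w ∈ words, pvSep ∉ w) (h5 : pvSep ∉ cur) :
    ∀ w ∈ segsOf words cur, pvSep ∉ w := by
  intro w hw
  unfold segsOf at hw
  split at hw
  · rcases List.mem_append.1 hw with h | h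
    · exact h4 w h
    · simp at h; subst h; exact h5
  · exact h4 w hw

theorem segs_nonempty (words : List (List Char)) (cur : List Char)
    (h3 : ∀ w ∈ words, w ≠ []) :
    ∀ w ∈ segsOf words cur, w ≠ [] := by
  intro w hw
  unfold segsOf at hw
  split at hw
  next hcur =>
    rcases List.mem_append.1 hw with h | h
    · exact h3 w h
    · simp at h; subst h; exact hcur
  next => exact h3 w hw

theorem to_felts_spec : Claim_equal_to_felts := by
  unfold Claim_equal_to_felts
  intro line hdom
  unfold Spec_to_felts to_felts to_felts_alt
  dsimp only
  have hdomall : ∀ c ∈ line.toList, pvDomChar c = true := by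
    have h := hdom
    unfold Dom_to_felts pvDomStr at h
    simpa [List.all_eq_true] using h
  have htypes : types_of_line line = line.toList.map (fun c => key_for_val (c.toNat : Int)) := by
    unfold types_of_line
    simpa using PySem.List.foldl_append_singleton_eq_map
      (fun c : Char => key_for_val (c.toNat : Int)) line.toList []
  have hzip : (line.toList.map (fun c => key_for_val (c.toNat : Int))).zip line.toList
      = line.toList.map (fun c => (key_for_val (c.toNat : Int), c)) := by
    have h := List.zip_map' (f := fun c : Char => key_for_val (c.toNat : Int)) (g := id)
      (l := line.toList)
    simpa using h
  have hR := loopR line.toList ([pvSep], [pvSep]) ([], [], -1) hdomall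
    ⟨by decide, by simp [joinS, segsOf], by simp, by simp, by simp, Or.inl rfl,
     fun _ => rfl, fun h => absurd rfl h⟩
  rw [htypes, hzip, List.foldl_map]
  set stB := line.toList.foldl stepB ([], [], -1) with hstB
  set stA := line.toList.foldl (fun st c => stepA st (key_for_val (c.toNat : Int), c))
    ([pvSep], [pvSep]) with hstA
  obtain ⟨h1, h2, h3, h4, h5, h6, h7, h8⟩ := hR
  rw [h2, splitOn_eq]
  rw [show hsplit pvSep [] (pvSep :: joinS (segsOf stB.1 stB.2.1))
      = [] :: ([] :: segsOf stB.1 stB.2.1) from by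
    simp only [hsplit]
    rw [hsplit_joinS _ [] (segs_sepfree _ _ h4 h5)]
    simp]
  rw [show (([] : List Char) :: [] :: segsOf stB.1 stB.2.1).foldl
      (fun ws w => if w ≠ [] then ws ++ [w] else ws) ([] : List (List Char))
      = segsOf stB.1 stB.2.1 from by
    rw [List.foldl_cons, List.foldl_cons, if_neg (by simp), if_neg (by simp)]
    exact (foldl_keep _ [] (segs_nonempty _ _ h3)).trans (by simp)]
  rw [PySem.List.foldl_append_singleton_eq_map convert_word_to_cairo_felt]
  rw [convert_eq_encode]
  rw [show (if stB.2.1 ≠ [] then stB.1 ++ [stB.2.1] else stB.1) = segsOf stB.1 stB.2.1 from rfl]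
  simp
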